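-- pv_equiv track=rewrite | github.com/ErikHeller/ki-coding-challenge | 5Gewinnt.py | findminusones
-- ===== SOURCE A (Python) =====
-- def last_element(state):
--     for i in range(len(state)):
--         if state[i] == 0:
--             return i - 1
--     return len(state) - 1
--
-- def findminusones(state):
--     a, b = 0, 0
--     last_e = last_element(state)
--     color = last_e % 2
--     for i in range(last_e + 1):
--         if i % 2 == color and state[i] == -1:
--             a += 1
--         elif i % 2 != color and state[i] == -1:
--             b += 1
--
--     return a, b
-- ===== SOURCE B (Python) =====
-- def findminusones(state):
--     try:
--         last_e = state.index(0) - 1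
--     except ValueError:
--         last_e = len(state) - 1
--     e, o = 0, 0
--     for x in reversed(state[:last_e + 1]):
--         e, o = o + (x == -1), e
--     return (e, o) if last_e % 2 == 0 else (o, e)
-- ===== Notes on version B (the rewrite author's own statement) =====
-- stated objective: alternative
-- what changed: Replaces A's index loop that tests i % 2 == color on every element by a single reversed swap-fold over the prefix (the pair (even,odd) swaps at each element, so no per-element parity test or index arithmetic), and finds the first zero with list.index instead of a hand-written index scan.
import Mathlib
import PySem

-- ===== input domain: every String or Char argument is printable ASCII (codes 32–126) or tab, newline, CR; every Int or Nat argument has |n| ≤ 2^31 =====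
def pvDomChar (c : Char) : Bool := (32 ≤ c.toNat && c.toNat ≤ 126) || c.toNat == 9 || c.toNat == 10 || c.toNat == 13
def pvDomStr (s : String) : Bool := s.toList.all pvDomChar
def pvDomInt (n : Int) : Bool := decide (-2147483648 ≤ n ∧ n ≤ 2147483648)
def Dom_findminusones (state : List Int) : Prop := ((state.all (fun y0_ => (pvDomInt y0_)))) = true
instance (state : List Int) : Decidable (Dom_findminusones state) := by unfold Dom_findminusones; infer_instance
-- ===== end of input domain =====

-- B replaces A's parity-branching index loop by one reversed swap-fold over the prefix
-- (no parity test per element) and finds the first zero with list.index; objective: alternative.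

-- ===== PORT A =====
def lastElementLoop (state : List Int) : List Int → Int
  | [] => PySem.List.len state - 1
  | i :: rest => if PySem.List.pyGetD state i 0 = 0 then i - 1 else lastElementLoop state rest

def lastElement (state : List Int) : Int :=
  lastElementLoop state (PySem.List.pyRange 0 (PySem.List.len state) 1)

def findminusones (state : List Int) : Int × Int :=
  let lastE := lastElement state
  let color := PySem.Int.mod lastE 2
  (PySem.List.pyRange 0 (lastE + 1) 1).foldl (fun (ab : Int × Int) i =>
    if PySem.Int.mod i 2 = color ∧ PySem.List.pyGetD state i 0 = -1 then (ab.1 + 1, ab.2)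
    else if PySem.Int.mod i 2 ≠ color ∧ PySem.List.pyGetD state i 0 = -1 then (ab.1, ab.2 + 1)
    else ab) (0, 0)

-- ===== PORT B =====
def findminusones_alt (state : List Int) : Int × Int :=
  let lastE : Int :=
    match PySem.List.index? state 0 with
    | some j => (j : Int) - 1             -- try: state.index(0) - 1
    | none => PySem.List.len state - 1    -- except ValueError
  let eo := ((PySem.List.slice state none (some (lastE + 1))).reverse).foldl
    (fun (eo : Int × Int) x => (eo.2 + (if x = -1 then 1 else 0), eo.1)) (0, 0)
  if PySem.Int.mod lastE 2 = 0 then eo else (eo.2, eo.1)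

-- ===== PRECONDITION & SPEC =====
def Spec_findminusones (state : List Int) (out : Int × Int) : Prop := out = findminusones_alt state
instance (state : List Int) (out : Int × Int) : Decidable (Spec_findminusones state out) := by unfold Spec_findminusones; infer_instance

-- ===== CLAIM (what is proved, stated in full; the proofs are below) =====
def Claim_equal_findminusones : Prop := ∀ (state : List Int), Dom_findminusones state → Spec_findminusones state (findminusones state)

-- ===== LEMMAS AND PROOFS =====

-- parity-split count of -1 entries: (at even indices, at odd indices)
def cnt2 : List Int → Int × Int
  | [] => (0, 0)
  | x :: r => ((cnt2 r).2 + (if x = -1 then 1 else 0), (cnt2 r).1)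

lemma cnt2_eq_foldr (p : List Int) :
    cnt2 p = p.foldr (fun x (eo : Int × Int) => (eo.2 + (if x = -1 then 1 else 0), eo.1)) (0, 0) := by
  induction p with
  | nil => rfl
  | cons x r ih => simp [cnt2, ih]

lemma mod_two_flip (s c : Int) (hc : c = 0 ∨ c = 1) :
    (PySem.Int.mod (s + 1) 2 = c) ↔ ¬ (PySem.Int.mod s 2 = c) := by
  rw [PySem.Int.mod_eq_emod_of_pos (show (0:Int) < 2 by omega),
    PySem.Int.mod_eq_emod_of_pos (show (0:Int) < 2 by omega)]
  omega

-- A's loop over enumerate, generalized over start index and accumulator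
lemma loopA_enum (p : List Int) (s c : Int) (acc : Int × Int) (hc : c = 0 ∨ c = 1) :
    (PySem.List.enumerate p s).foldl (fun (ab : Int × Int) ix =>
      if PySem.Int.mod ix.1 2 = c ∧ ix.2 = -1 then (ab.1 + 1, ab.2)
      else if PySem.Int.mod ix.1 2 ≠ c ∧ ix.2 = -1 then (ab.1, ab.2 + 1)
      else ab) acc
    = (acc.1 + (if PySem.Int.mod s 2 = c then (cnt2 p).1 else (cnt2 p).2),
       acc.2 + (if PySem.Int.mod s 2 = c then (cnt2 p).2 else (cnt2 p).1)) := by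
  induction p generalizing s acc with
  | nil => simp [PySem.List.enumerate_nil, cnt2]
  | cons x r ih =>
    rw [PySem.List.enumerate_cons, List.foldl_cons, ih (s + 1) _ , cnt2]
    have hflip := mod_two_flip s c hc
    by_cases hs : PySem.Int.mod s 2 = c <;> by_cases hx : x = (-1 : Int) <;>
      simp only [hs, hx] <;> simp_all <;> ring


-- lastElementLoop over the tail range [a, len) equals list.index-based search in state.drop a
lemma lastElement_loop_char (state : List Int) (fuel a : Nat)
    (hf : state.length - a ≤ fuel) (ha : a ≤ state.length) :
    lastElementLoop state (PySem.List.pyRange (a : Int) (state.length : Int) 1) =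
      (match PySem.List.index? (state.drop a) 0 with
       | some j => (a : Int) + (j : Int) - 1
       | none => (state.length : Int) - 1) := by
  induction fuel generalizing a with
  | zero =>
    have hae : a = state.length := by omega
    subst hae
    rw [PySem.List.pyRange_one_eq_nil (by omega)]
    simp [lastElementLoop, PySem.List.index?]
  | succ m ih =>
    by_cases hlt : a < state.length
    · rw [PySem.List.pyRange_one_cons (by exact_mod_cast hlt)]
      have hdrop : state.drop a = state[a] :: state.drop (a + 1) :=
        (List.getElem_cons_drop hlt).symm
      have hget : PySem.List.pyGetD state (a : Int) 0 = state[a] := by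
        rw [PySem.List.pyGetD_natCast]; exact List.getD_eq_getElem state 0 hlt
      simp only [lastElementLoop, hget]
      by_cases hz : state[a] = (0 : Int)
      · rw [if_pos hz, hdrop, hz]
        rw [PySem.List.index?_cons_self]
        push_cast; ring
      · rw [if_neg hz]
        have h1 : ((a : Int) + 1) = ((a + 1 : Nat) : Int) := by push_cast; ring
        rw [h1, ih (a + 1) (by omega) (by omega), hdrop,
          PySem.List.index?_cons_of_ne _ hz]
        cases hidx : PySem.List.index? (state.drop (a + 1)) 0 with
        | none => simp
        | some j => simp; ring
    · have hae : a = state.length := by omega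
      subst hae
      rw [PySem.List.pyRange_one_eq_nil (by omega)]
      simp [lastElementLoop, PySem.List.index?]

-- the counting loop of A over the first n entries, for color c in {0,1}
lemma loopA_count (state : List Int) (n : Nat) (hn : n ≤ state.length)
    (c : Int) (hc : c = 0 ∨ c = 1) :
    (PySem.List.pyRange 0 ((n : Int)) 1).foldl (fun (ab : Int × Int) i =>
      if PySem.Int.mod i 2 = c ∧ PySem.List.pyGetD state i 0 = -1 then (ab.1 + 1, ab.2)
      else if PySem.Int.mod i 2 ≠ c ∧ PySem.List.pyGetD state i 0 = -1 then (ab.1, ab.2 + 1)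
      else ab) (0, 0)
    = (if c = 0 then cnt2 (state.take n)
       else ((cnt2 (state.take n)).2, (cnt2 (state.take n)).1)) := by
  set p := state.take n with hp
  have hplen : p.length = n := by simp [hp]; omega
  have hcongr : (PySem.List.pyRange 0 ((n : Int)) 1).foldl (fun (ab : Int × Int) i =>
      if PySem.Int.mod i 2 = c ∧ PySem.List.pyGetD state i 0 = -1 then (ab.1 + 1, ab.2)
      else if PySem.Int.mod i 2 ≠ c ∧ PySem.List.pyGetD state i 0 = -1 then (ab.1, ab.2 + 1)
      else ab) (0, 0)
    = (PySem.List.pyRange 0 ((n : Int)) 1).foldl (fun (ab : Int × Int) i =>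
      if PySem.Int.mod i 2 = c ∧ PySem.List.pyGetD p i 0 = -1 then (ab.1 + 1, ab.2)
      else if PySem.Int.mod i 2 ≠ c ∧ PySem.List.pyGetD p i 0 = -1 then (ab.1, ab.2 + 1)
      else ab) (0, 0) := by
    apply PySem.List.foldl_congr_mem
    intro acc i hi
    rw [PySem.List.mem_pyRange_one] at hi
    have h0 : 0 ≤ i := hi.1
    have h1 : i < (n : Int) := hi.2
    have hget : PySem.List.pyGetD state i 0 = PySem.List.pyGetD p i 0 := by
      rw [PySem.List.pyGetD_eq_getElem state 0 h0 (by omega),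
        PySem.List.pyGetD_eq_getElem p 0 h0 (by rw [hplen]; exact_mod_cast h1)]
      exact (List.getElem_take).symm
    rw [hget]
  rw [hcongr]
  have henum : (PySem.List.pyRange 0 ((n : Int)) 1).foldl (fun (ab : Int × Int) i =>
      if PySem.Int.mod i 2 = c ∧ PySem.List.pyGetD p i 0 = -1 then (ab.1 + 1, ab.2)
      else if PySem.Int.mod i 2 ≠ c ∧ PySem.List.pyGetD p i 0 = -1 then (ab.1, ab.2 + 1)
      else ab) (0, 0)
    = (PySem.List.enumerate p 0).foldl (fun (ab : Int × Int) ix =>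
      if PySem.Int.mod ix.1 2 = c ∧ ix.2 = -1 then (ab.1 + 1, ab.2)
      else if PySem.Int.mod ix.1 2 ≠ c ∧ ix.2 = -1 then (ab.1, ab.2 + 1)
      else ab) (0, 0) := by
    rw [PySem.List.enumerate_eq_map_pyRange p 0, List.foldl_map,
      PySem.List.len_eq, hplen]
  rw [henum, loopA_enum p 0 c (0, 0) hc]
  have h0 : PySem.Int.mod 0 2 = (0 : Int) := by decide
  rcases hc with hc | hc <;> subst hc <;> simp

theorem findminusones_spec : Claim_equal_findminusones := by
  intro state _
  show findminusones state = findminusones_alt state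
  -- the two last-element computations agree
  have hL : lastElement state =
      (match PySem.List.index? state 0 with
       | some j => (j : Int) - 1
       | none => (state.length : Int) - 1) := by
    have := lastElement_loop_char state state.length 0 (by omega) (by omega)
    simp only [List.drop_zero] at this
    unfold lastElement
    rw [PySem.List.len_eq]
    rw [show ((0 : Nat) : Int) = (0 : Int) by norm_num] at this
    rw [this]
    cases PySem.List.index? state 0 <;> simp
  set L : Int := (match PySem.List.index? state 0 with
       | some j => ((j : Int)) - 1
       | none => (state.length : Int) - 1) with hLdef
  -- L + 1 is a natural number at most the length
  obtain ⟨n, hn1, hn2⟩ : ∃ n : Nat, L + 1 = (n : Int) ∧ n ≤ state.length := by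
    cases hidx : PySem.List.index? state 0 with
    | some j =>
      have hj : j < state.length := (PySem.List.getElem_of_index?_eq_some hidx).1
      refine ⟨j, ?_, by omega⟩
      rw [hLdef, hidx]; ring
    | none =>
      rcases Nat.eq_zero_or_pos state.length with h0 | h0
      · refine ⟨0, ?_, by omega⟩
        rw [hLdef, hidx, h0]; ring
      · refine ⟨state.length, ?_, le_refl _⟩
        rw [hLdef, hidx]; ring
  have hc : PySem.Int.mod L 2 = 0 ∨ PySem.Int.mod L 2 = 1 := by
    have h1 := PySem.Int.mod_nonneg L (show (0:Int) < 2 by omega)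
    have h2 := PySem.Int.mod_lt L (show (0:Int) < 2 by omega)
    omega
  unfold findminusones findminusones_alt
  simp only [PySem.List.len_eq, hL]
  rw [← hLdef, hn1, loopA_count state n hn2 _ hc]
  rw [PySem.List.slice_to_natCast, List.foldl_reverse, ← cnt2_eq_foldr]
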